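-- pv_equiv track=rewrite | github.com/hezronokwach/SpotifiWrapped | modules/database.py | _correct_genre_for_artist
-- ===== SOURCE A (Python) =====
-- def _correct_genre_for_artist(genre_name: str, artist_name: str) -> str:
--     """
--     Correct genre misclassifications for specific Kenyan artists.
--
--     Args:
--         genre_name: Original genre from Spotify API
--         artist_name: Artist name
--
--     Returns:
--         Corrected genre name or None if genre should be filtered out
--     """
--     if not artist_name:
--         return genre_name
--
--     artist_lower = artist_name.lower()
--
--     # Define Kenyan R&B/Soul artists who are often misclassified as gengetone
--     kenyan_rnb_soul_artists = [
--         'bien', 'bensoul', 'okello max', 'njerae', 'sauti sol', 'nyota ndogo',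
--         'crystal asige', 'fena gitu', 'nikita kering', 'karun', 'blinky bill',
--         'muthoni drummer queen', 'kagwe mungai', 'amani grace', 'xenia manasseh',
--         'cedo', 'brandy maina', 'tetu shani', 'kaskazini', 'kansoul'
--     ]
--
--     # Define true gengetone artists
--     true_gengetone_artists = [
--         'ethic entertainment', 'boondocks gang', 'sailors', 'mbogi genje',
--         'ochungulo family', 'rieng', 'zzero sufuri', 'guzman', 'rekles',
--         'dmore', 'ssaru', 'trio mio', 'exray', 'nelly the goon', 'mejja',
--         'ethic', 'sailors gang', 'boondocks', 'mbogi genje'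
--     ]
--
--     # Define Kenyan hip hop/rap artists
--     kenyan_hiphop_artists = [
--         'nyashinski', 'khaligraph jones', 'octopizzo', 'king kaka', 'collo',
--         'prezzo', 'rabbit', 'femi one', 'kristoff', 'timmy tdat', 'boutross',
--         'vicmass luodollar', 'smallz lethal', 'nazizi', 'jua cali'
--     ]
--
--     # Apply corrections based on artist classification
--     if any(artist in artist_lower for artist in kenyan_rnb_soul_artists):
--         # For R&B/Soul artists, prioritize correct genres and filter out gengetone
--         if genre_name.lower() == 'gengetone':
--             return None  # Filter out gengetone for R&B artists
--         elif genre_name.lower() in ['afro r&b', 'afro soul']: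
--             return genre_name  # Keep correct R&B/Soul genres
--         elif genre_name.lower() in ['rumba congolaise', 'bongo flava', 'afropop', 'afrobeats']:
--             return genre_name  # Keep related African genres
--
--     elif any(artist in artist_lower for artist in kenyan_hiphop_artists):
--         # For Hip Hop artists, prioritize hip hop and filter out gengetone
--         if genre_name.lower() == 'gengetone':
--             return 'kenyan hip hop'  # Convert gengetone to hip hop
--         elif genre_name.lower() in ['hip hop', 'rap', 'trap']:
--             return 'kenyan hip hop'  # Standardize to kenyan hip hop
--
--     elif any(artist in artist_lower for artist in true_gengetone_artists):
--         # For true gengetone artists, keep gengetone and filter out R&B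
--         if genre_name.lower() in ['afro r&b', 'afro soul']:
--             return None  # Filter out R&B for gengetone artists
--         elif genre_name.lower() == 'gengetone':
--             return 'gengetone'  # Keep gengetone
--
--     return genre_name
-- ===== SOURCE B (Python) =====
-- # B: genre-first transposed rule table — look up the lowercased genre once; only if it
-- # is one of the six special genres scan the artist keyword groups, applying that
-- # genre's per-group outcome (keep / filter / replacement). Objective: simpler.
--
-- _KEEP = object()  # keep the original genre_name
--
-- # artist keyword groups in priority order: R&B/soul, hip hop, gengetone
-- _GROUPS = [
--     ['bien', 'bensoul', 'okello max', 'njerae', 'sauti sol', 'nyota ndogo',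
--      'crystal asige', 'fena gitu', 'nikita kering', 'karun', 'blinky bill',
--      'muthoni drummer queen', 'kagwe mungai', 'amani grace', 'xenia manasseh',
--      'cedo', 'brandy maina', 'tetu shani', 'kaskazini', 'kansoul'],
--     ['nyashinski', 'khaligraph jones', 'octopizzo', 'king kaka', 'collo',
--      'prezzo', 'rabbit', 'femi one', 'kristoff', 'timmy tdat', 'boutross',
--      'vicmass luodollar', 'smallz lethal', 'nazizi', 'jua cali'],
--     ['ethic entertainment', 'boondocks gang', 'sailors', 'mbogi genje',
--      'ochungulo family', 'rieng', 'zzero sufuri', 'guzman', 'rekles',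
--      'dmore', 'ssaru', 'trio mio', 'exray', 'nelly the goon', 'mejja',
--      'ethic', 'sailors gang', 'boondocks', 'mbogi genje'],
-- ]
--
-- # transposed rules: special genre -> (outcome for R&B group, hip hop group, gengetone group)
-- _RULES = {
--     'gengetone': (None, 'kenyan hip hop', 'gengetone'),
--     'afro r&b': (_KEEP, _KEEP, None),
--     'afro soul': (_KEEP, _KEEP, None),
--     'hip hop': (_KEEP, 'kenyan hip hop', _KEEP),
--     'rap': (_KEEP, 'kenyan hip hop', _KEEP),
--     'trap': (_KEEP, 'kenyan hip hop', _KEEP),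
-- }
--
--
-- def _correct_genre_for_artist(genre_name: str, artist_name: str) -> str:
--     if not artist_name:
--         return genre_name
--     row = _RULES.get(genre_name.lower())
--     if row is None:
--         return genre_name  # not a special genre: no artist scan needed
--     artist_lower = artist_name.lower()
--     for outcome, keywords in zip(row, _GROUPS):
--         if any(k in artist_lower for k in keywords):
--             return genre_name if outcome is _KEEP else outcome
--     return genre_name
-- ===== Notes on version B (the rewrite author's own statement) =====
-- stated objective: simpler
-- what changed: B is genre-first instead of artist-first: it looks the lowercased genre up once in a transposed rule table (special genre -> per-artist-group outcome keep/filter/replace) and scans the artist keyword groups only when the genre is special, whereas A always classifies the artist through three hand-written if/elif branches each with its own genre chain.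
import Mathlib
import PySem

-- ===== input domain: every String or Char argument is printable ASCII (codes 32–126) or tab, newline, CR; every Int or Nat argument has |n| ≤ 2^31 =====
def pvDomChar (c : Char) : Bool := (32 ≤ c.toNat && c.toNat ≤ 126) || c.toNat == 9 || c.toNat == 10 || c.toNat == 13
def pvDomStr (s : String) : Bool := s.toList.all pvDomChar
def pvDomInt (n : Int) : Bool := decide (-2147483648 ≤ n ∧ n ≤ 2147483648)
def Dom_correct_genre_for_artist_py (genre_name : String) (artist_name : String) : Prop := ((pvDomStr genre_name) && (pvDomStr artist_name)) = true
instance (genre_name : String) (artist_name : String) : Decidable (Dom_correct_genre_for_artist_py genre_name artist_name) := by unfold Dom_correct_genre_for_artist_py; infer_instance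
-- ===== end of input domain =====

-- B is genre-first: one transposed rule table keyed by the lowercased genre, and the
-- artist keyword groups are scanned only when the genre is special; objective: simpler.

-- ===== PORT A =====
def pvRnbSoulArtists : List String :=
  ["bien", "bensoul", "okello max", "njerae", "sauti sol", "nyota ndogo",
   "crystal asige", "fena gitu", "nikita kering", "karun", "blinky bill",
   "muthoni drummer queen", "kagwe mungai", "amani grace", "xenia manasseh",
   "cedo", "brandy maina", "tetu shani", "kaskazini", "kansoul"]

def pvGengetoneArtists : List String :=
  ["ethic entertainment", "boondocks gang", "sailors", "mbogi genje",
   "ochungulo family", "rieng", "zzero sufuri", "guzman", "rekles",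
   "dmore", "ssaru", "trio mio", "exray", "nelly the goon", "mejja",
   "ethic", "sailors gang", "boondocks", "mbogi genje"]

def pvHiphopArtists : List String :=
  ["nyashinski", "khaligraph jones", "octopizzo", "king kaka", "collo",
   "prezzo", "rabbit", "femi one", "kristoff", "timmy tdat", "boutross",
   "vicmass luodollar", "smallz lethal", "nazizi", "jua cali"]

def correct_genre_for_artist_py (genre_name : String) (artist_name : String) : Option String :=
  if artist_name == "" then some genre_name
  else
    let artist_lower := PySem.Str.lower artist_name
    if pvRnbSoulArtists.any (fun artist => PySem.Str.isIn artist artist_lower) then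
      if PySem.Str.lower genre_name == "gengetone" then none
      else if ["afro r&b", "afro soul"].contains (PySem.Str.lower genre_name) then some genre_name
      else if ["rumba congolaise", "bongo flava", "afropop", "afrobeats"].contains (PySem.Str.lower genre_name) then some genre_name
      else some genre_name
    else if pvHiphopArtists.any (fun artist => PySem.Str.isIn artist artist_lower) then
      if PySem.Str.lower genre_name == "gengetone" then some "kenyan hip hop"
      else if ["hip hop", "rap", "trap"].contains (PySem.Str.lower genre_name) then some "kenyan hip hop"
      else some genre_name
    else if pvGengetoneArtists.any (fun artist => PySem.Str.isIn artist artist_lower) then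
      if ["afro r&b", "afro soul"].contains (PySem.Str.lower genre_name) then none
      else if PySem.Str.lower genre_name == "gengetone" then some "gengetone"
      else some genre_name
    else some genre_name

-- ===== PORT B =====
inductive GenreFix
  | keep
  | filter
  | to : String → GenreFix
deriving DecidableEq, Repr

-- transposed rule table: special genre -> outcome per artist group (R&B, hip hop, gengetone)
def pvRules : PySem.Dict String (GenreFix × GenreFix × GenreFix) :=
  PySem.Dict.mk
    [("gengetone", (GenreFix.filter, GenreFix.to "kenyan hip hop", GenreFix.to "gengetone")),
     ("afro r&b", (GenreFix.keep, GenreFix.keep, GenreFix.filter)),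
     ("afro soul", (GenreFix.keep, GenreFix.keep, GenreFix.filter)),
     ("hip hop", (GenreFix.keep, GenreFix.to "kenyan hip hop", GenreFix.keep)),
     ("rap", (GenreFix.keep, GenreFix.to "kenyan hip hop", GenreFix.keep)),
     ("trap", (GenreFix.keep, GenreFix.to "kenyan hip hop", GenreFix.keep))]

-- the 'for outcome, keywords in zip(row, _GROUPS)' loop of Source B
def pvApplyRow (genre_name : String) (artist_lower : String) : List (GenreFix × List String) → Option String
  | [] => some genre_name
  | (outcome, keywords) :: rest =>
    if keywords.any (fun k => PySem.Str.isIn k artist_lower) then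
      match outcome with
      | GenreFix.keep => some genre_name
      | GenreFix.filter => none
      | GenreFix.to s => some s
    else pvApplyRow genre_name artist_lower rest

def correct_genre_for_artist_py_alt (genre_name : String) (artist_name : String) : Option String :=
  if artist_name == "" then some genre_name
  else
    match PySem.Dict.get? pvRules (PySem.Str.lower genre_name) with
    | none => some genre_name
    | some (r1, r2, r3) =>
      pvApplyRow genre_name (PySem.Str.lower artist_name)
        [(r1, pvRnbSoulArtists), (r2, pvHiphopArtists), (r3, pvGengetoneArtists)]

-- ===== PRECONDITION & SPEC =====
def Spec_correct_genre_for_artist_py (genre_name : String) (artist_name : String) (out : Option String) : Prop := out = correct_genre_for_artist_py_alt genre_name artist_name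
instance (genre_name : String) (artist_name : String) (out : Option String) : Decidable (Spec_correct_genre_for_artist_py genre_name artist_name out) := by unfold Spec_correct_genre_for_artist_py; infer_instance

-- ===== CLAIM (what is proved, stated in full; the proofs are below) =====
def Claim_equal_correct_genre_for_artist_py : Prop := ∀ (genre_name : String) (artist_name : String), Dom_correct_genre_for_artist_py genre_name artist_name → Spec_correct_genre_for_artist_py genre_name artist_name (correct_genre_for_artist_py genre_name artist_name)

-- ===== LEMMAS AND PROOFS =====

-- ===== VERDICT (by name: the statement is the Claim_ definition above) =====
set_option maxHeartbeats 2000000 in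
theorem correct_genre_for_artist_py_spec : Claim_equal_correct_genre_for_artist_py := by
  intro g a _
  unfold Spec_correct_genre_for_artist_py correct_genre_for_artist_py correct_genre_for_artist_py_alt
  by_cases ha : a == ""
  · simp only [ha, if_true]
  · simp only [ha, if_false, Bool.false_eq_true]
    by_cases hg1 : PySem.Str.lower g = "gengetone"
    · by_cases h1 : (pvRnbSoulArtists.any (fun n => PySem.Str.isIn n (PySem.Str.lower a))) = true <;>
      by_cases h2 : (pvHiphopArtists.any (fun n => PySem.Str.isIn n (PySem.Str.lower a))) = true <;>
      by_cases h3 : (pvGengetoneArtists.any (fun n => PySem.Str.isIn n (PySem.Str.lower a))) = true <;>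
      simp [hg1, h1, h2, h3, pvApplyRow, pvRules, PySem.Dict.get?, List.find?]
    · by_cases hg2 : PySem.Str.lower g = "afro r&b"
      · by_cases h1 : (pvRnbSoulArtists.any (fun n => PySem.Str.isIn n (PySem.Str.lower a))) = true <;>
        by_cases h2 : (pvHiphopArtists.any (fun n => PySem.Str.isIn n (PySem.Str.lower a))) = true <;>
        by_cases h3 : (pvGengetoneArtists.any (fun n => PySem.Str.isIn n (PySem.Str.lower a))) = true <;>
        simp [hg2, h1, h2, h3, pvApplyRow, pvRules, PySem.Dict.get?, List.find?]
      · by_cases hg3 : PySem.Str.lower g = "afro soul"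
        · by_cases h1 : (pvRnbSoulArtists.any (fun n => PySem.Str.isIn n (PySem.Str.lower a))) = true <;>
          by_cases h2 : (pvHiphopArtists.any (fun n => PySem.Str.isIn n (PySem.Str.lower a))) = true <;>
          by_cases h3 : (pvGengetoneArtists.any (fun n => PySem.Str.isIn n (PySem.Str.lower a))) = true <;>
          simp [hg3, h1, h2, h3, pvApplyRow, pvRules, PySem.Dict.get?, List.find?]
        · by_cases hg4 : PySem.Str.lower g = "hip hop"
          · by_cases h1 : (pvRnbSoulArtists.any (fun n => PySem.Str.isIn n (PySem.Str.lower a))) = true <;>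
            by_cases h2 : (pvHiphopArtists.any (fun n => PySem.Str.isIn n (PySem.Str.lower a))) = true <;>
            by_cases h3 : (pvGengetoneArtists.any (fun n => PySem.Str.isIn n (PySem.Str.lower a))) = true <;>
            simp [hg4, h1, h2, h3, pvApplyRow, pvRules, PySem.Dict.get?, List.find?]
          · by_cases hg5 : PySem.Str.lower g = "rap"
            · by_cases h1 : (pvRnbSoulArtists.any (fun n => PySem.Str.isIn n (PySem.Str.lower a))) = true <;>
              by_cases h2 : (pvHiphopArtists.any (fun n => PySem.Str.isIn n (PySem.Str.lower a))) = true <;>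
              by_cases h3 : (pvGengetoneArtists.any (fun n => PySem.Str.isIn n (PySem.Str.lower a))) = true <;>
              simp [hg5, h1, h2, h3, pvApplyRow, pvRules, PySem.Dict.get?, List.find?]
            · by_cases hg6 : PySem.Str.lower g = "trap"
              · by_cases h1 : (pvRnbSoulArtists.any (fun n => PySem.Str.isIn n (PySem.Str.lower a))) = true <;>
                by_cases h2 : (pvHiphopArtists.any (fun n => PySem.Str.isIn n (PySem.Str.lower a))) = true <;>
                by_cases h3 : (pvGengetoneArtists.any (fun n => PySem.Str.isIn n (PySem.Str.lower a))) = true <;>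
                simp [hg6, h1, h2, h3, pvApplyRow, pvRules, PySem.Dict.get?, List.find?]
              · have e1 : ("gengetone" == PySem.Str.lower g) = false := beq_eq_false_iff_ne.mpr (Ne.symm hg1)
                have e2 : ("afro r&b" == PySem.Str.lower g) = false := beq_eq_false_iff_ne.mpr (Ne.symm hg2)
                have e3 : ("afro soul" == PySem.Str.lower g) = false := beq_eq_false_iff_ne.mpr (Ne.symm hg3)
                have e4 : ("hip hop" == PySem.Str.lower g) = false := beq_eq_false_iff_ne.mpr (Ne.symm hg4)
                have e5 : ("rap" == PySem.Str.lower g) = false := beq_eq_false_iff_ne.mpr (Ne.symm hg5)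
                have e6 : ("trap" == PySem.Str.lower g) = false := beq_eq_false_iff_ne.mpr (Ne.symm hg6)
                by_cases h1 : (pvRnbSoulArtists.any (fun n => PySem.Str.isIn n (PySem.Str.lower a))) = true <;>
                by_cases h2 : (pvHiphopArtists.any (fun n => PySem.Str.isIn n (PySem.Str.lower a))) = true <;>
                by_cases h3 : (pvGengetoneArtists.any (fun n => PySem.Str.isIn n (PySem.Str.lower a))) = true <;>
                simp only [h1, h2, h3, if_true, if_false, Bool.false_eq_true] <;>
                simp [pvRules, PySem.Dict.get?, List.find?, List.contains_eq_mem,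
                      e1, e2, e3, e4, e5, e6, hg1, hg2, hg3, hg4, hg5, hg6] <;>
                (first | rfl | (split_ifs <;> rfl))
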